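-- pv_equiv track=rewrite | github.com/kosticlab/pan_ecological_gene_universe | annotate_raw_orfs/run_DIAMOND_with_CAT_postprocessing/parse_diamond_output.py | find_lineage
-- ===== SOURCE A (Python) =====
-- def find_lineage(taxid, taxid2parent, lineage=None):
--     if lineage is None:
--         lineage = []
--
--     lineage.append(taxid)
--
--     if taxid2parent[taxid] == taxid:
--         return lineage
--     else:
--         return find_lineage(taxid2parent[taxid], taxid2parent, lineage)
-- ===== SOURCE B (Python) =====
-- def find_lineage(taxid, taxid2parent, lineage=None):
--     # Iterative: collect the parent chain first, then extend/return the lineage once.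
--     chain = []
--     parent = taxid2parent[taxid]
--     while parent != taxid:
--         chain.append(taxid)
--         taxid, parent = parent, taxid2parent[parent]
--     chain.append(taxid)
--     if lineage is None:
--         return chain
--     lineage.extend(chain)
--     return lineage
-- ===== Notes on version B (the rewrite author's own statement) =====
-- stated objective: alternative
-- what changed: Replaces A's recursion (which threads the growing lineage list through each call) with an iterative two-pointer walk that builds the chain locally and extends the caller's lineage once at the end.
import Mathlib
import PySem

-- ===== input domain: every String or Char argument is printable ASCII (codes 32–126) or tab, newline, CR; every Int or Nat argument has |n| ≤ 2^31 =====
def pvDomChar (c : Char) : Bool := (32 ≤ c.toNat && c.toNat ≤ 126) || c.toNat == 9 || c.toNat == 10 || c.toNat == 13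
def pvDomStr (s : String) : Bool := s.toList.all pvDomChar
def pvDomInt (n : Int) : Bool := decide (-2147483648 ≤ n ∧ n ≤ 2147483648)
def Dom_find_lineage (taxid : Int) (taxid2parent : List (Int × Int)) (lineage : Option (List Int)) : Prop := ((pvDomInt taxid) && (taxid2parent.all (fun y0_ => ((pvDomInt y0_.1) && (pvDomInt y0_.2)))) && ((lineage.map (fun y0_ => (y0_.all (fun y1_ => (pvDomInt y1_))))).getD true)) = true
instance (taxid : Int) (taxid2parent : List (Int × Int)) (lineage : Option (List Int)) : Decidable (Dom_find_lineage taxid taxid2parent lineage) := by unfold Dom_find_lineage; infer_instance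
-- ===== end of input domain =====

-- B replaces A's recursion (accumulator threaded through each call) by an iterative walk that
-- builds the chain locally and extends the lineage once.  Both A and B append to a caller-supplied
-- `lineage` list in place; the equivalence proved here is about the RETURN value.

-- dict lookup taxid2parent[k] (first match; Python dicts have unique keys)
def pvLookup (m : List (Int × Int)) (k : Int) : Option Int :=
  (m.find? (fun kv => kv.1 == k)).map (·.2)

-- ===== PORT A =====
-- A's recursion threading the lineage accumulator; fuel (length+1) bounds the recursion depth,
-- which Pre_ guarantees is enough (a terminating chain has distinct keys of the dict).
def find_lineage_go (fuel : Nat) (taxid : Int) (m : List (Int × Int)) (lineage : List Int) : List Int :=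
  match fuel with
  | 0 => lineage
  | fuel + 1 =>
    let lineage := lineage ++ [taxid]     -- lineage.append(taxid)
    match pvLookup m taxid with
    | none => lineage                     -- KeyError: excluded by Pre_
    | some p => if p = taxid then lineage else find_lineage_go fuel p m lineage

def find_lineage (taxid : Int) (taxid2parent : List (Int × Int)) (lineage : Option (List Int)) : List Int :=
  find_lineage_go (taxid2parent.length + 1) taxid taxid2parent (lineage.getD [])

-- ===== PORT B =====
-- the while-loop: state (taxid, parent) plus the chain built so far; one iteration per parent step
def find_lineage_alt_loop (fuel : Nat) (taxid parent : Int) (m : List (Int × Int)) (chain : List Int) : List Int :=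
  match fuel with
  | 0 => chain
  | fuel + 1 =>
    if parent ≠ taxid then
      match pvLookup m parent with
      | none => chain                     -- KeyError: excluded by Pre_
      | some pp => find_lineage_alt_loop fuel parent pp m (chain ++ [taxid])
    else chain ++ [taxid]                 -- loop ends; chain.append(taxid)

def find_lineage_alt (taxid : Int) (taxid2parent : List (Int × Int)) (lineage : Option (List Int)) : List Int :=
  match pvLookup taxid2parent taxid with
  | none => lineage.getD []               -- KeyError: excluded by Pre_
  | some p =>
    let chain := find_lineage_alt_loop (taxid2parent.length + 1) taxid p taxid2parent []
    match lineage with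
    | none => chain
    | some ls => ls ++ chain

-- ===== PRECONDITION & SPEC =====
-- Pre_: exactly the inputs on which Python A returns normally — every lookup on the walk from
-- taxid succeeds and a fixpoint (root) is reached; length+1 steps suffice because a terminating
-- walk never revisits a key.
def pvReaches (m : List (Int × Int)) : Nat → Int → Bool
  | 0, _ => false
  | n + 1, t =>
    match pvLookup m t with
    | none => false
    | some p => if p = t then true else pvReaches m n p

def Pre_find_lineage (taxid : Int) (taxid2parent : List (Int × Int)) (lineage : Option (List Int)) : Prop :=
  pvReaches taxid2parent (taxid2parent.length + 1) taxid = true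

instance (taxid : Int) (taxid2parent : List (Int × Int)) (lineage : Option (List Int)) : Decidable (Pre_find_lineage taxid taxid2parent lineage) := by unfold Pre_find_lineage; infer_instance

def pvWitness_find_lineage : Int × (List (Int × Int)) × Option (List Int) := (1, [(1, 2), (2, 2)], some [9])

def Spec_find_lineage (taxid : Int) (taxid2parent : List (Int × Int)) (lineage : Option (List Int)) (out : List Int) : Prop := out = find_lineage_alt taxid taxid2parent lineage
instance (taxid : Int) (taxid2parent : List (Int × Int)) (lineage : Option (List Int)) (out : List Int) : Decidable (Spec_find_lineage taxid taxid2parent lineage out) := by unfold Spec_find_lineage; infer_instance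

-- ===== CLAIM (what is proved, stated in full; the proofs are below) =====
def Claim_equal_find_lineage : Prop := ∀ (taxid : Int) (taxid2parent : List (Int × Int)) (lineage : Option (List Int)), Dom_find_lineage taxid taxid2parent lineage → Pre_find_lineage taxid taxid2parent lineage → Spec_find_lineage taxid taxid2parent lineage (find_lineage taxid taxid2parent lineage)

-- ===== LEMMAS AND PROOFS =====

-- canonical chain from t with fuel n
def pvWalk (m : List (Int × Int)) : Nat → Int → List Int
  | 0, _ => []
  | n + 1, t =>
    match pvLookup m t with
    | none => []
    | some p => if p = t then [t] else t :: pvWalk m n p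

theorem go_eq_walk (m : List (Int × Int)) :
    ∀ (n : Nat) (t : Int) (acc : List Int), pvReaches m n t = true →
      find_lineage_go n t m acc = acc ++ pvWalk m n t := by
  intro n
  induction n with
  | zero => intro t acc h; simp [pvReaches] at h
  | succ n ih =>
    intro t acc h
    simp only [pvReaches] at h
    simp only [find_lineage_go, pvWalk]
    cases hl : pvLookup m t with
    | none => rw [hl] at h; simp at h
    | some p =>
      rw [hl] at h
      by_cases hp : p = t
      · simp [hp]
      · simp only [if_neg hp] at h ⊢
        rw [ih p _ h]
        simp

theorem loop_eq_walk (m : List (Int × Int)) :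
    ∀ (n : Nat) (t p : Int) (acc : List Int),
      pvReaches m (n + 1) t = true → pvLookup m t = some p →
      find_lineage_alt_loop (n + 1) t p m acc = acc ++ pvWalk m (n + 1) t := by
  intro n
  induction n with
  | zero =>
    intro t p acc h hl
    simp only [pvReaches, hl] at h
    by_cases hp : p = t
    · simp [find_lineage_alt_loop, pvWalk, hl, hp]
    · rw [if_neg hp] at h
      simp at h
  | succ n ih =>
    intro t p acc h hl
    simp only [pvReaches, hl] at h
    by_cases hp : p = t
    · simp [find_lineage_alt_loop, pvWalk, hl, hp]
    · rw [if_neg hp] at h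
      cases hpp : pvLookup m p with
      | none => simp [hpp] at h
      | some pp =>
        have hstep : find_lineage_alt_loop (n + 1 + 1) t p m acc
            = find_lineage_alt_loop (n + 1) p pp m (acc ++ [t]) := by
          conv_lhs => rw [find_lineage_alt_loop]
          rw [if_pos hp, hpp]
        rw [hstep, ih p pp (acc ++ [t]) h hpp]
        simp [pvWalk, hl, hp, List.append_assoc]

-- ===== VERDICT (by name: the statement is the Claim_ definition above) =====
theorem find_lineage_spec : Claim_equal_find_lineage := by
  intro taxid m lineage _ hpre
  have hpre' : pvReaches m (m.length + 1) taxid = true := hpre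
  unfold Spec_find_lineage find_lineage find_lineage_alt
  cases hl : pvLookup m taxid with
  | none => simp [pvReaches, hl] at hpre'
  | some p =>
    rw [go_eq_walk m _ _ _ hpre']
    have hloop := loop_eq_walk m m.length taxid p [] hpre' hl
    cases lineage <;> simp [hloop]
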